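-- pv_equiv track=rewrite | github.com/iCxts/pythonnumerodos | task/10.py | find_max_score
-- ===== SOURCE A (Python) =====
-- def find_max_score(records: list[tuple[str, int]]) -> str:
--     if not records:
--         raise ValueError("records cant be empty")
--
--     scores = list(map(lambda record: record[1], records))
--     highest_index = 0
--
--     for i, score in enumerate(scores[1:], start=1):
--         if score > scores[highest_index]:
--             highest_index = i
--
--     return records[highest_index][0]
-- ===== SOURCE B (Python) =====
-- def find_max_score(records: list[tuple[str, int]]) -> str:
--     if not records:
--         raise ValueError("records cant be empty")
--     return sorted(records, key=lambda record: record[1], reverse=True)[0][0]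
-- ===== Notes on version B (the rewrite author's own statement) =====
-- stated objective: simpler
-- what changed: Replaced the explicit index-tracking max scan over enumerate(scores[1:]) with a stable reverse sort by score and picking the first element; stability preserves A's first-tie behaviour.
import Mathlib
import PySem

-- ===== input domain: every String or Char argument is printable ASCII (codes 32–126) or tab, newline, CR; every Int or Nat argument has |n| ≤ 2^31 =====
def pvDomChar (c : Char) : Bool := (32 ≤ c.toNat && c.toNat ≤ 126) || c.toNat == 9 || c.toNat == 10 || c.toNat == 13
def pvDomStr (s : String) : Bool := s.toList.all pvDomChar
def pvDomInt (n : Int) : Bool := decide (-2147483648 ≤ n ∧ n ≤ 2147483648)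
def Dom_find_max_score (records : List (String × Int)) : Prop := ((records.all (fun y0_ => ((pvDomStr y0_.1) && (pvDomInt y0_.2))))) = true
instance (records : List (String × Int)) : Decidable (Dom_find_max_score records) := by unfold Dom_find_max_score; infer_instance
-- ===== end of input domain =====

-- B replaces A's explicit index-tracking max scan with a stable reverse sort by score
-- and picking the first element (simpler; stability preserves A's first-tie behaviour).


-- ===== PORT A =====
-- literal port: empty list raises ValueError (excluded by Pre_); scores = map of second
-- components; loop over enumerate(scores[1:], start=1) tracking highest_index.
def find_max_score (records : List (String × Int)) : String :=
  if records = [] then ""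
  else
    let scores := records.map (fun record => record.2)
    let highest_index : Int :=
      (PySem.List.enumerate (PySem.List.slice scores (some 1) none) 1).foldl
        (fun highest_index p =>
          if p.2 > PySem.List.pyGetD scores highest_index 0 then p.1 else highest_index)
        0
    (PySem.List.pyGetD records highest_index ("", 0)).1

-- ===== PORT B =====
def find_max_score_alt (records : List (String × Int)) : String :=
  if records = [] then ""
  else (PySem.List.pyGetD (PySem.List.sorted records (fun record => record.2) true) 0 ("", 0)).1

-- ===== PRECONDITION & SPEC =====
-- Pre_ excludes exactly the empty list, on which Python A raises ValueError.
def Pre_find_max_score (records : List (String × Int)) : Prop := records ≠ []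
instance (records : List (String × Int)) : Decidable (Pre_find_max_score records) := by unfold Pre_find_max_score; infer_instance
def pvWitness_find_max_score : (List (String × Int)) := [("a", 1), ("b", 2)]

def Spec_find_max_score (records : List (String × Int)) (out : String) : Prop := out = find_max_score_alt records
instance (records : List (String × Int)) (out : String) : Decidable (Spec_find_max_score records out) := by unfold Spec_find_max_score; infer_instance

-- ===== CLAIM (what is proved, stated in full; the proofs are below) =====
def Claim_equal_find_max_score : Prop := ∀ (records : List (String × Int)), Dom_find_max_score records → Pre_find_max_score records → Spec_find_max_score records (find_max_score records)

-- ===== LEMMAS AND PROOFS =====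

-- the "first maximum" fold both sides compute: keep acc unless a STRICTLY larger score appears
def pvFM (a : String × Int) (xs : List (String × Int)) : String × Int :=
  xs.foldl (fun acc x => if acc.2 < x.2 then x else acc) a

-- head of insertBy on a nonempty list
theorem pv_insertBy_cons (before : (String × Int) → (String × Int) → Bool)
    (x h : String × Int) (rest : List (String × Int)) :
    ∃ r', PySem.List.insertBy before x (h :: rest) = (if before x h then x else h) :: r' := by
  by_cases hb : before x h = true
  · exact ⟨h :: rest, by simp [PySem.List.insertBy, hb]⟩
  · exact ⟨PySem.List.insertBy before x rest, by simp [PySem.List.insertBy, hb]⟩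

-- invariant for B's sort-fold: the head of the accumulator is the running first-max
theorem pv_sortfold_head (xs : List (String × Int)) :
    ∀ (h : String × Int) (rest : List (String × Int)),
    ∃ r', xs.foldl (fun acc x =>
        PySem.List.insertBy (fun a b => decide (b.2 < a.2)) x acc) (h :: rest)
      = pvFM h xs :: r' := by
  induction xs with
  | nil => intro h rest; exact ⟨rest, by simp [pvFM]⟩
  | cons x t ih =>
    intro h rest
    obtain ⟨r1, hr1⟩ := pv_insertBy_cons (fun a b => decide (b.2 < a.2)) x h rest
    simp only [List.foldl_cons, hr1]
    obtain ⟨r2, hr2⟩ := ih (if decide (h.2 < x.2) = true then x else h) r1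
    refine ⟨r2, ?_⟩
    rw [hr2]
    by_cases hc : h.2 < x.2 <;> simp [pvFM, hc]

theorem pv_sortfold_head' (xs : List (String × Int)) (h : String × Int)
    (rest : List (String × Int)) :
    ∃ r', xs.foldl (fun acc x =>
        PySem.List.insertBy (fun a b => decide (b.2 < a.2)) x acc) (h :: rest)
      = pvFM h xs :: r' := pv_sortfold_head xs h rest

-- invariant for A's index loop: if hi points at cur and l is the suffix of records
-- starting at position s, the loop returns an index pointing at pvFM cur l
theorem pv_idxloop (l : List (String × Int)) :
    ∀ (records : List (String × Int)) (s hi : Int) (cur : String × Int),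
    PySem.List.pyGet? records hi = some cur →
    (∀ k : Nat, ∀ hk : k < l.length, PySem.List.pyGet? records (s + k) = some l[k]) →
    PySem.List.pyGet? records
      ((PySem.List.enumerate (l.map (fun r => r.2)) s).foldl
        (fun hi p =>
          if p.2 > PySem.List.pyGetD (records.map (fun r => r.2)) hi 0 then p.1 else hi) hi)
      = some (pvFM cur l) := by
  induction l with
  | nil => intro records s hi cur hcur _; simpa [pvFM] using hcur
  | cons x t ih =>
    intro records s hi cur hcur hsuf
    have hx : PySem.List.pyGet? records s = some x := by
      simpa using hsuf 0 (by simp)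
    have hget : PySem.List.pyGetD (records.map (fun r => r.2)) hi 0 = cur.2 := by
      have hm := PySem.List.pyGetD_map (fun r : String × Int => r.2) records hi ("", 0)
      have hd : PySem.List.pyGetD records hi ("", 0) = cur := by
        simp [PySem.List.pyGetD, hcur]
      simpa [hd] using hm
    have hsuf' : ∀ k : Nat, ∀ hk : k < t.length,
        PySem.List.pyGet? records ((s + 1) + k) = some t[k] := by
      intro k hk
      have := hsuf (k + 1) (by simpa using Nat.succ_lt_succ hk)
      simpa [add_comm, add_left_comm, add_assoc] using this
    simp only [List.map_cons, PySem.List.enumerate_cons, List.foldl_cons]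
    by_cases hc : x.2 > cur.2
    · rw [if_pos (by rw [hget]; exact hc)]
      have := ih records (s + 1) s x hx hsuf'
      simpa [pvFM, show cur.2 < x.2 from hc] using this
    · rw [if_neg (by rw [hget]; exact hc)]
      have := ih records (s + 1) hi cur hcur hsuf'
      simpa [pvFM, show ¬ cur.2 < x.2 from hc] using this

-- A computes the first-max name
theorem pv_A_eq (r : String × Int) (rs : List (String × Int)) :
    find_max_score (r :: rs) = (pvFM r rs).1 := by
  unfold find_max_score
  rw [if_neg (by simp)]
  simp only [PySem.List.slice_from_one, List.map_cons, List.tail_cons]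
  have h := pv_idxloop rs (r :: rs) 1 0 r (by exact PySem.List.pyGet?_zero_cons r rs)
    (by
      intro k hk
      rw [show (1 : Int) + k = (k : Int) + 1 by ring, PySem.List.pyGet?_cons_succ]
      simp [hk])
  simp only [List.map_cons] at h
  simp only [PySem.List.pyGetD] at h ⊢
  rw [h]
  rfl

-- B computes the first-max name
theorem pv_B_eq (r : String × Int) (rs : List (String × Int)) :
    find_max_score_alt (r :: rs) = (pvFM r rs).1 := by
  unfold find_max_score_alt
  rw [if_neg (by simp)]
  rw [PySem.List.sorted_rev_eq_foldl_insertBy]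
  simp only [List.foldl_cons]
  have h1 : PySem.List.insertBy (fun a b => decide (b.2 < a.2)) r ([] : List (String × Int))
      = [r] := by simp [PySem.List.insertBy]
  rw [h1]
  obtain ⟨r', hr'⟩ := pv_sortfold_head' rs r []
  rw [hr']
  simp [PySem.List.pyGetD]

-- ===== VERDICT (by name: the statement is the Claim_ definition above) =====
theorem find_max_score_spec : Claim_equal_find_max_score := by
  intro records _ hpre
  unfold Spec_find_max_score
  cases records with
  | nil => exact absurd rfl hpre
  | cons r rs => rw [pv_A_eq, pv_B_eq]
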